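-- pv_equiv track=rewrite | github.com/oleggikk/smartlmsExam | 2var2task.py | findIndexesOfStrings
-- ===== SOURCE A (Python) =====
-- def findIndexesOfStrings(lenS: int, s:list) -> list:
--     count = 0
--     list_of_strings = []
--     i = 0
--     while i < lenS:
--         b = []
--         b.append(i)
--         while (s[i] != 0):
--             i += 1
--             count += 1
--             if (i == lenS):
--                 break
--         if (i == lenS):
--             b.append(i-1)
--         else:
--             b.append(i)
--         b.append(count)
--         count = 0
--         i += 1
--         list_of_strings.append(b)
--     return list_of_strings
-- ===== SOURCE B (Python) =====
-- def findIndexesOfStrings(lenS: int, s: list) -> list: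
--     zeros = [p for p in range(lenS) if s[p] == 0]
--     res = []
--     start = 0
--     for z in zeros:
--         res.append([start, z, z - start])
--         start = z + 1
--     if start < lenS:
--         res.append([start, lenS - 1, lenS - start])
--     return res
-- ===== Notes on version B (the rewrite author's own statement) =====
-- stated objective: simpler
-- what changed: A's nested while-loops with an incrementing counter are replaced by first building the table of zero positions in one pass and then deriving each segment's bounds and length by subtraction in a second pass.
import Mathlib
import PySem

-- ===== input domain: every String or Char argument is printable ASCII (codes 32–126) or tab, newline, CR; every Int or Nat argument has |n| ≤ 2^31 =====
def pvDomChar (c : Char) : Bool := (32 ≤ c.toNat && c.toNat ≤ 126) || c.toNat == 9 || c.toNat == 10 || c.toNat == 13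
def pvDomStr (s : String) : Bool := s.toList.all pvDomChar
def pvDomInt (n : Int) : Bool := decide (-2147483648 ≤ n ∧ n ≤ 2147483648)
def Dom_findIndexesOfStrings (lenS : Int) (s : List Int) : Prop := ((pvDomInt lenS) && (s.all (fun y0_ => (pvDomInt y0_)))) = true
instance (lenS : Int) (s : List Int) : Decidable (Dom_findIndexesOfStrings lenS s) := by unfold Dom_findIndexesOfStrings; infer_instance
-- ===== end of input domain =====

-- B replaces A's nested while-loops by a one-pass table of zero positions plus a
-- derivation pass computing segment lengths by subtraction (objective: simpler).

-- ===== PORT A =====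
-- inner 'while s[i] != 0' loop: advances i and count; fuel = remaining distance to lenS
def pvInnerA (lenS : Int) (s : List Int) : Nat → Int → Int → Int × Int
  | 0, i, count => (i, count)
  | f+1, i, count =>
    if (PySem.List.pyGet? s i).getD 0 ≠ 0 then
      if i + 1 = lenS then (i + 1, count + 1)
      else pvInnerA lenS s f (i + 1) (count + 1)
    else (i, count)

-- outer 'while i < lenS' loop; i strictly increases each iteration so fuel lenS.toNat suffices
def pvOuterA (lenS : Int) (s : List Int) : Nat → Int → List (List Int) → List (List Int)
  | 0, _, acc => acc.reverse
  | f+1, i, acc =>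
    if i < lenS then
      let r := pvInnerA lenS s (lenS - i).toNat i 0
      let second := if r.1 = lenS then r.1 - 1 else r.1
      pvOuterA lenS s f (r.1 + 1) ([i, second, r.2] :: acc)
    else acc.reverse

def findIndexesOfStrings (lenS : Int) (s : List Int) : List (List Int) :=
  pvOuterA lenS s lenS.toNat 0 []

-- ===== PORT B =====
def findIndexesOfStrings_alt (lenS : Int) (s : List Int) : List (List Int) :=
  let zeros := (PySem.List.pyRange 0 lenS 1).filter (fun p => (PySem.List.pyGet? s p).getD 0 == 0)
  let r := zeros.foldl (fun (acc : List (List Int) × Int) z => (acc.1 ++ [[acc.2, z, z - acc.2]], z + 1)) ([], 0)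
  if r.2 < lenS then r.1 ++ [[r.2, lenS - 1, lenS - r.2]] else r.1

-- ===== PRECONDITION & SPEC =====
-- Pre_ excludes lenS > len(s): there the Python A (and B) raise IndexError reading s[i].
def Pre_findIndexesOfStrings (lenS : Int) (s : List Int) : Prop := lenS ≤ (s.length : Int)
instance (lenS : Int) (s : List Int) : Decidable (Pre_findIndexesOfStrings lenS s) := by unfold Pre_findIndexesOfStrings; infer_instance
def pvWitness_findIndexesOfStrings : Int × List Int := (5, [1, 0, 2, 3, 0])

def Spec_findIndexesOfStrings (lenS : Int) (s : List Int) (out : List (List Int)) : Prop := out = findIndexesOfStrings_alt lenS s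
instance (lenS : Int) (s : List Int) (out : List (List Int)) : Decidable (Spec_findIndexesOfStrings lenS s out) := by unfold Spec_findIndexesOfStrings; infer_instance

-- ===== CLAIM (what is proved, stated in full; the proofs are below) =====
def Claim_equal_findIndexesOfStrings : Prop := ∀ (lenS : Int) (s : List Int), Dom_findIndexesOfStrings lenS s → Pre_findIndexesOfStrings lenS s → Spec_findIndexesOfStrings lenS s (findIndexesOfStrings lenS s)

-- ===== LEMMAS AND PROOFS =====

-- the list of zero positions in [i, lenS)
def pvZeros (lenS : Int) (s : List Int) (i : Int) : List Int :=
  (PySem.List.pyRange i lenS 1).filter (fun p => (PySem.List.pyGet? s p).getD 0 == 0)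

-- segment list built from the zero table starting at `start` (B's fold, recursively)
def pvSegs (lenS : Int) : List Int → Int → List (List Int)
  | [], start => if start < lenS then [[start, lenS - 1, lenS - start]] else []
  | z :: zs, start => [start, z, z - start] :: pvSegs lenS zs (z + 1)

lemma pvZeros_nil {lenS : Int} (s : List Int) {i : Int} (h : lenS ≤ i) : pvZeros lenS s i = [] := by
  simp [pvZeros, PySem.List.pyRange_one_eq_nil h]

lemma pvZeros_step {lenS : Int} (s : List Int) {i : Int} (h : i < lenS) :
    pvZeros lenS s i =
      (if (PySem.List.pyGet? s i).getD 0 = 0 then (i :: pvZeros lenS s (i + 1)) else pvZeros lenS s (i + 1)) := by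
  unfold pvZeros
  rw [PySem.List.pyRange_one_cons h]
  by_cases hz : (PySem.List.pyGet? s i).getD 0 = 0 <;> simp [hz]

-- B's fold over zeros equals pvSegs, with any accumulator
lemma pvFold_eq_segs (lenS : Int) : ∀ (zs : List Int) (res : List (List Int)) (start : Int),
    (let r := zs.foldl (fun (acc : List (List Int) × Int) z => (acc.1 ++ [[acc.2, z, z - acc.2]], z + 1)) (res, start)
     if r.2 < lenS then r.1 ++ [[r.2, lenS - 1, lenS - r.2]] else r.1)
    = res ++ pvSegs lenS zs start := by
  intro zs
  induction zs with
  | nil =>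
    intro res start
    by_cases h : start < lenS <;> simp [pvSegs, h]
  | cons z zs ih =>
    intro res start
    simp only [List.foldl_cons, pvSegs]
    rw [ih (res ++ [[start, z, z - start]]) (z + 1)]
    simp

-- the inner while loop finds the first zero position (or stops at lenS)
lemma pvInnerA_spec (lenS : Int) (s : List Int) :
    ∀ (f : Nat) (i count : Int), i < lenS → (lenS - i).toNat ≤ f →
    pvInnerA lenS s f i count =
      (match pvZeros lenS s i with
       | [] => (lenS, count + (lenS - i))
       | z :: _ => (z, count + (z - i))) := by
  intro f
  induction f with
  | zero => intro i count hi hf; omega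
  | succ f ih =>
    intro i count hi hf
    rw [pvZeros_step s hi]
    by_cases hz : (PySem.List.pyGet? s i).getD 0 = 0
    · simp [pvInnerA, hz]
    · simp only [pvInnerA, if_pos (by simpa using hz), if_neg hz]
      by_cases hend : i + 1 = lenS
      · rw [if_pos hend, pvZeros_nil s (le_of_eq hend.symm)]
        simp; omega
      · rw [if_neg hend, ih (i+1) (count+1) (by omega) (by omega)]
        cases h : pvZeros lenS s (i+1) <;> simp <;> omega

-- the outer while loop from position i produces acc.reverse ++ pvSegs (zeros from i)
lemma pvOuterA_spec (lenS : Int) (s : List Int) :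
    ∀ (f : Nat) (i : Int) (acc : List (List Int)), (lenS - i).toNat ≤ f →
    pvOuterA lenS s f i acc = acc.reverse ++ pvSegs lenS (pvZeros lenS s i) i := by
  intro f
  induction f with
  | zero =>
    intro i acc hf
    have hle : lenS ≤ i := by omega
    rw [pvZeros_nil s hle]
    simp [pvOuterA, pvSegs, not_lt.mpr hle]
  | succ f ih =>
    intro i acc hf
    by_cases hi : i < lenS
    · simp only [pvOuterA, if_pos hi]
      rw [pvInnerA_spec lenS s _ i 0 hi (le_refl _)]
      cases hz : pvZeros lenS s i with
      | nil =>
        simp only [if_true]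
        rw [ih (lenS + 1) _ (by omega), pvZeros_nil s (by omega)]
        simp [pvSegs, hi]
      | cons z zs =>
        have hzmem : z ∈ pvZeros lenS s i := by rw [hz]; exact List.mem_cons_self
        have hzlt : z < lenS := by
          have := (PySem.List.mem_pyRange_one).mp (List.mem_of_mem_filter hzmem)
          omega
        have hzi : i ≤ z := by
          have := (PySem.List.mem_pyRange_one).mp (List.mem_of_mem_filter hzmem)
          omega
        have hzs : pvZeros lenS s (z + 1) = zs := by
          unfold pvZeros at hz ⊢
          rw [PySem.List.pyRange_one_append i (z+1) lenS (by omega) (by omega),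
            List.filter_append] at hz
          have hzfz : (PySem.List.pyGet? s z).getD 0 == 0 := by
            have := List.of_mem_filter hzmem
            simpa using this
          -- the first part of the filter is [z]
          have hfirst : ((PySem.List.pyRange i (z+1) 1).filter (fun p => (PySem.List.pyGet? s p).getD 0 == 0)) = [z] := by
            -- from hz : filter₁ ++ filter₂ = z :: zs and z ∉ pyRange i (z+1)… easier: heads
            cases hcase : (PySem.List.pyRange i (z+1) 1).filter (fun p => (PySem.List.pyGet? s p).getD 0 == 0) with
            | nil =>
              exfalso
              have : z ∈ (PySem.List.pyRange i (z+1) 1).filter (fun p => (PySem.List.pyGet? s p).getD 0 == 0) := by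
                apply List.mem_filter.mpr
                exact ⟨PySem.List.mem_pyRange_one.mpr ⟨hzi, by omega⟩, hzfz⟩
              rw [hcase] at this; exact absurd this (List.not_mem_nil)
            | cons w ws =>
              rw [hcase] at hz
              have hw : w = z := by
                have := List.head_eq_of_cons_eq hz
                simpa using this
              subst hw
              have hws : ws ++ (PySem.List.pyRange (w+1) lenS 1).filter (fun p => (PySem.List.pyGet? s p).getD 0 == 0) = zs :=
                List.tail_eq_of_cons_eq hz
              -- every element of ws is in pyRange w (w+1)... must show ws = []
              cases ws with
              | nil => rfl
              | cons u us =>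
                exfalso
                have hu : u ∈ (PySem.List.pyRange i (w+1) 1) := by
                  have : u ∈ (w :: u :: us) := by simp
                  rw [← hcase] at this
                  exact List.mem_of_mem_filter this
                have hnd : (PySem.List.pyRange i (w+1) 1).Nodup := PySem.List.nodup_pyRange_one i (w+1)
                have hsorted : (PySem.List.pyRange i (w+1) 1).Pairwise (· < ·) := PySem.List.pairwise_lt_pyRange_one i (w+1)
                -- w :: u :: us is a sublist of the range (filter), so w < u; but u < w+1 from membership
                have hub : u < w + 1 := ((PySem.List.mem_pyRange_one).mp hu).2
                have hpair : (w :: u :: us).Pairwise (· < ·) := by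
                  rw [← hcase]; exact hsorted.sublist List.filter_sublist
                have : w < u := (List.pairwise_cons.mp hpair).1 u (by simp)
                omega
          rw [hfirst] at hz
          exact (List.tail_eq_of_cons_eq hz)
        simp only []
        rw [if_neg (by omega), ih (z + 1) _ (by omega), hzs, pvSegs]
        simp
    · rw [pvZeros_nil s (by omega)]
      simp [pvOuterA, pvSegs, hi]

-- ===== VERDICT (by name: the statement is the Claim_ definition above) =====
theorem findIndexesOfStrings_spec : Claim_equal_findIndexesOfStrings := by
  intro lenS s _ _
  unfold Spec_findIndexesOfStrings findIndexesOfStrings findIndexesOfStrings_alt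
  rw [pvOuterA_spec lenS s lenS.toNat 0 [] (by omega)]
  rw [pvFold_eq_segs lenS _ [] 0]
  rfl
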